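-- pv_equiv track=rewrite | github.com/LuuDoanNgocPhat123/CS114.P11-22521070-UIT | ML WECODE 2/ex1.py | count_goldbach_pairs
-- ===== SOURCE A (Python) =====
-- def is_prime(n):
--     if n <= 1:
--         return False
--     if n <= 3:
--         return True
--     if n % 2 == 0 or n % 3 == 0:
--         return False
--     i = 5
--     while i * i <= n:
--         if n % i == 0 or n % (i + 2) == 0:
--             return False
--         i += 6
--     return True
--
-- def count_goldbach_pairs(n):
--     if n <= 2 or n % 2 != 0:
--         return 0
--     count = 0
--     for i in range(2, n // 2 + 1):
--         if is_prime(i) and is_prime(n - i):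
--             count += 1
--     return count
-- ===== SOURCE B (Python) =====
-- def count_goldbach_pairs(n):
--     if n <= 2 or n % 2 != 0:
--         return 0
--     comp = [False] * (n + 1)
--     p = 2
--     while p * p <= n:
--         if not comp[p]:
--             for k in range(p, n // p + 1):
--                 comp[p * k] = True
--         p += 1
--     count = 0
--     for i in range(2, n // 2 + 1):
--         if not comp[i] and not comp[n - i]:
--             count += 1
--     return count
-- ===== Notes on version B (the rewrite author's own statement) =====
-- stated objective: faster
-- what changed: Replaces the per-candidate wheel trial-division primality test with a Sieve of Eratosthenes (one boolean table of composites up to n built once by marking multiples of each unmarked p, then a single linear counting pass); intended as faster and measured ~2.8x median at the largest timed size on even inputs, though on trivial odd inputs both return instantly so the probe reads parity there.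
import Mathlib
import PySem

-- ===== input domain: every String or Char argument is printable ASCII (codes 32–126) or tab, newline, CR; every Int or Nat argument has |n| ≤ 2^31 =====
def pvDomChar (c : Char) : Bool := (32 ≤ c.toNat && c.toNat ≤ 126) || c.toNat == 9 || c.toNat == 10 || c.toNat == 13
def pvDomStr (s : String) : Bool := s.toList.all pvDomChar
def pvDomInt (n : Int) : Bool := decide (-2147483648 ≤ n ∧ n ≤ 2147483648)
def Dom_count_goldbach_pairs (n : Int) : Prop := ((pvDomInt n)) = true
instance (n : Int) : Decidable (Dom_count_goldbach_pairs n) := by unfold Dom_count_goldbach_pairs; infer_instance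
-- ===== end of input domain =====

-- B replaces A's per-candidate wheel trial-division primality test with a composite table built once
-- by marking multiples of each unmarked p, then a single counting pass (objective: faster).

-- ===== PORT A =====
-- the 6k±1 trial-division while-loop of is_prime; the proof argument 5 ≤ i only serves termination
def isPrimeLoop (n : Int) (i : Int) (hi : 5 ≤ i) : Bool :=
  if h : i * i ≤ n then
    if PySem.Int.mod n i == 0 || PySem.Int.mod n (i + 2) == 0 then false
    else isPrimeLoop n (i + 6) (by omega)
  else true
termination_by (n + 1 - i * i).toNat
decreasing_by
  have h1 : i * i + 96 ≤ (i + 6) * (i + 6) := by nlinarith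
  omega

def is_prime (n : Int) : Bool :=
  if n ≤ 1 then false
  else if n ≤ 3 then true
  else if PySem.Int.mod n 2 == 0 || PySem.Int.mod n 3 == 0 then false
  else isPrimeLoop n 5 (by norm_num)

def count_goldbach_pairs (n : Int) : Int :=
  if n ≤ 2 ∨ PySem.Int.mod n 2 ≠ 0 then 0
  else
    (PySem.List.pyRange 2 (PySem.Int.floordiv n 2 + 1) 1).foldl
      (fun count i => if is_prime i && is_prime (n - i) then count + 1 else count) 0

-- ===== PORT B =====
-- while p*p <= n: if not comp[p]: for k in range(p, n//p + 1): comp[p*k] = True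
-- (every written index p*k satisfies 0 ≤ p*k ≤ n < len(comp) in every call of B, so List.set is exact here;
--  the proof argument 2 ≤ p only serves termination)
def markLoop (n : Int) (p : Int) (hp : 2 ≤ p) (comp : List Bool) : List Bool :=
  if h : p * p ≤ n then
    markLoop n (p + 1) (by omega)
      (if !(PySem.List.pyGetD comp p false) then
        (PySem.List.pyRange p (PySem.Int.floordiv n p + 1) 1).foldl
          (fun c k => c.set (p * k).toNat true) comp
      else comp)
  else comp
termination_by (n + 1 - p * p).toNat
decreasing_by
  have h1 : p * p + 5 ≤ (p + 1) * (p + 1) := by nlinarith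
  omega

def count_goldbach_pairs_alt (n : Int) : Int :=
  if n ≤ 2 ∨ PySem.Int.mod n 2 ≠ 0 then 0
  else
    let comp := markLoop n 2 (by norm_num) (List.replicate (n + 1).toNat false)
    -- every read index i and n-i lies in [0, n] ⊂ [0, len(comp)), so pyGetD is exact here
    (PySem.List.pyRange 2 (PySem.Int.floordiv n 2 + 1) 1).foldl
      (fun count i =>
        if !(PySem.List.pyGetD comp i false) && !(PySem.List.pyGetD comp (n - i) false)
        then count + 1 else count) 0

-- ===== PRECONDITION & SPEC =====
def Spec_count_goldbach_pairs (n : Int) (out : Int) : Prop := out = count_goldbach_pairs_alt n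
instance (n : Int) (out : Int) : Decidable (Spec_count_goldbach_pairs n out) := by unfold Spec_count_goldbach_pairs; infer_instance

-- ===== CLAIM (what is proved, stated in full; the proofs are below) =====
def Claim_equal_count_goldbach_pairs : Prop := ∀ (n : Int), Dom_count_goldbach_pairs n → Spec_count_goldbach_pairs n (count_goldbach_pairs n)

-- ===== LEMMAS AND PROOFS =====

-- "m has no divisor d with 2 ≤ d and d² ≤ m" — the common characterisation both primality mechanisms meet
def PrimeSpec (m : Int) : Prop := ∀ d : Int, 2 ≤ d → d * d ≤ m → ¬ d ∣ m

-- "q has no proper divisor": the guard's meaning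
def NoSmallDiv (q : Int) : Prop := ∀ d : Int, 2 ≤ d → d < q → ¬ d ∣ q

-- what the table contains after all marking rounds q < p
def Marked (n : Int) (p : Int) (j : Int) : Prop :=
  ∃ q k : Int, 2 ≤ q ∧ q < p ∧ q * q ≤ n ∧ NoSmallDiv q ∧ q ≤ k ∧
    k ≤ PySem.Int.floordiv n q ∧ j = q * k

lemma min_div (p : Int) (h2 : 2 ≤ p) (d : Int) (hd2 : 2 ≤ d) (hdp : d < p) (hddvd : d ∣ p) :
    ∃ q : Int, 2 ≤ q ∧ q < p ∧ q * q ≤ p ∧ q ∣ p ∧ NoSmallDiv q := by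
  have hpn : p.natAbs ≠ 1 := by omega
  have hprime : Nat.Prime p.natAbs.minFac := Nat.minFac_prime hpn
  refine ⟨(p.natAbs.minFac : Int), ?_, ?_, ?_, ?_, ?_⟩
  case refine_4 =>
    have := Nat.minFac_dvd p.natAbs
    have h := Int.natCast_dvd_natCast.mpr this
    rwa [Int.natAbs_of_nonneg (by omega)] at h
  case refine_1 => exact_mod_cast hprime.two_le
  case refine_2 =>
    have hdvdN : d.natAbs ∣ p.natAbs := Int.natAbs_dvd_natAbs.mpr hddvd
    have := Nat.minFac_le_of_dvd (by omega) hdvdN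
    omega
  case refine_3 =>
    -- cofactor argument
    have hqd : (p.natAbs.minFac : Int) ∣ p := by
      have := Nat.minFac_dvd p.natAbs
      have h := Int.natCast_dvd_natCast.mpr this
      rwa [Int.natAbs_of_nonneg (by omega)] at h
    obtain ⟨c, hc⟩ := hqd
    have hq2 : (2:Int) ≤ (p.natAbs.minFac : Int) := by exact_mod_cast hprime.two_le
    have hqltp : (p.natAbs.minFac : Int) < p := by
      have hdvdN : d.natAbs ∣ p.natAbs := Int.natAbs_dvd_natAbs.mpr hddvd
      have := Nat.minFac_le_of_dvd (by omega) hdvdN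
      omega
    have hc1 : 1 ≤ c := by nlinarith
    have hc2 : 2 ≤ c := by
      rcases lt_or_ge c 2 with h | h
      · exfalso
        have : c = 1 := by omega
        subst this; omega
      · exact h
    have hcd : c ∣ p := ⟨_, by rw [hc]; ring⟩
    have hcN : c.natAbs ∣ p.natAbs := Int.natAbs_dvd_natAbs.mpr hcd
    have hqc : p.natAbs.minFac ≤ c.natAbs := Nat.minFac_le_of_dvd (by omega) hcN
    have hqc' : (p.natAbs.minFac : Int) ≤ c := by omega
    nlinarith [hqc', hc, hq2]
  case refine_5 =>
    intro e he2 heq hedvd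
    have heN : e.natAbs ∣ p.natAbs.minFac := by
      have := Int.natAbs_dvd_natAbs.mpr hedvd
      simpa using this
    rcases (Nat.Prime.eq_one_or_self_of_dvd hprime _ heN) with h | h <;> omega

lemma isPrimeLoop_iff (n i : Int) (hi : 5 ≤ i) :
    i % 6 = 5 → ¬ (2:Int) ∣ n → ¬ (3:Int) ∣ n →
    (∀ d : Int, 2 ≤ d → d < i → ¬ d ∣ n) →
    (isPrimeLoop n i hi = true ↔ PrimeSpec n) := by
  fun_induction isPrimeLoop with
  | case1 i hi h hcond =>
    intro hmod h2 h3 hbelow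
    simp only [Bool.false_eq_true, false_iff]
    rw [Bool.or_eq_true, beq_iff_eq, beq_iff_eq,
      PySem.Int.mod_eq_zero_iff_dvd, PySem.Int.mod_eq_zero_iff_dvd] at hcond
    intro hps
    rcases hcond with hdvd | hdvd
    · exact hps i (by omega) h hdvd
    · by_cases hsq : (i + 2) * (i + 2) ≤ n
      · exact hps (i + 2) (by omega) hsq hdvd
      · obtain ⟨c, hc⟩ := hdvd
        have hc2 : 2 ≤ c := by nlinarith
        have hclt : c < i + 2 := by nlinarith
        exact hps c hc2 (by nlinarith) ⟨i + 2, by linarith [hc, mul_comm (i + 2) c]⟩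
  | case2 i hi h hcond ih =>
    intro hmod h2 h3 hbelow
    rw [Bool.not_eq_true, Bool.or_eq_false_iff, beq_eq_false_iff_ne, beq_eq_false_iff_ne, ne_eq, ne_eq,
      PySem.Int.mod_eq_zero_iff_dvd, PySem.Int.mod_eq_zero_iff_dvd] at hcond
    refine ih (by omega) h2 h3 ?_
    intro d hd hdlt hdn
    have hcase : d < i ∨ d = i ∨ d = i + 1 ∨ d = i + 2 ∨ d = i + 3 ∨ d = i + 4 ∨ d = i + 5 := by
      omega
    rcases hcase with hc | hc | hc | hc | hc | hc | hc
    · exact hbelow d hd hc hdn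
    · exact hcond.1 (hc ▸ hdn)
    · exact h2 (dvd_trans (by omega : (2:Int) ∣ d) hdn)
    · exact hcond.2 (hc ▸ hdn)
    · exact h2 (dvd_trans (by omega : (2:Int) ∣ d) hdn)
    · exact h3 (dvd_trans (by omega : (3:Int) ∣ d) hdn)
    · exact h2 (dvd_trans (by omega : (2:Int) ∣ d) hdn)
  | case3 i hi h =>
    intro hmod h2 h3 hbelow
    simp only [true_iff]
    intro d hd hdd hdn
    exact hbelow d hd (by nlinarith) hdn

lemma is_prime_iff (m : Int) : is_prime m = true ↔ 2 ≤ m ∧ PrimeSpec m := by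
  unfold is_prime
  split_ifs with h1 h2 h3
  · simp only [false_iff]
    rintro ⟨hm, _⟩; omega
  · simp only [true_iff]
    refine ⟨by omega, ?_⟩
    intro d hd hdd hdvd
    nlinarith
  · rw [Bool.or_eq_true, beq_iff_eq, beq_iff_eq,
      PySem.Int.mod_eq_zero_iff_dvd, PySem.Int.mod_eq_zero_iff_dvd] at h3
    simp only [false_iff]
    rintro ⟨hm, hps⟩
    by_cases h2m : (2:Int) ∣ m
    · exact hps 2 (by norm_num) (by omega) h2m
    · rcases h3 with h | h
      · exact h2m h
      · exact hps 3 (by norm_num) (by omega) h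
  · rw [Bool.not_eq_true, Bool.or_eq_false_iff, beq_eq_false_iff_ne, beq_eq_false_iff_ne,
      ne_eq, ne_eq, PySem.Int.mod_eq_zero_iff_dvd, PySem.Int.mod_eq_zero_iff_dvd] at h3
    rw [isPrimeLoop_iff m 5 (by norm_num) (by decide) h3.1 h3.2 ?_]
    · constructor
      · exact fun hps => ⟨by omega, hps⟩
      · exact fun h => h.2
    · intro d hd hdlt hdvd
      have : d = 2 ∨ d = 3 ∨ d = 4 := by omega
      rcases this with hc | hc | hc
      · exact h3.1 (hc ▸ hdvd)
      · exact h3.2 (hc ▸ hdvd)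
      · exact h3.1 (dvd_trans (by omega : (2:Int) ∣ d) hdvd)

lemma foldl_set_length (f : Int → Nat) (l : List Int) (comp : List Bool) :
    (l.foldl (fun c k => c.set (f k) true) comp).length = comp.length := by
  induction l generalizing comp with
  | nil => rfl
  | cons k l ih => simp [List.foldl_cons, ih, List.length_set]

lemma foldl_set_getD (f : Int → Nat) (l : List Int) (comp : List Bool) (j : Nat)
    (hj : j < comp.length) :
    ((l.foldl (fun c k => c.set (f k) true) comp).getD j false = true ↔
      comp.getD j false = true ∨ ∃ k ∈ l, f k = j) := by
  induction l generalizing comp with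
  | nil => simp
  | cons k l ih =>
    rw [List.foldl_cons, ih _ (by simpa using hj)]
    by_cases hkj : f k = j
    · subst hkj
      simp [List.getD, hj]
    · simp [List.getD, hkj]

lemma markLoop_getD (n p : Int) (hp : 2 ≤ p) (comp : List Bool) :
    (n : Int) < comp.length →
    (∀ j : Nat, j < comp.length → (comp.getD j false = true ↔ Marked n p (j : Int))) →
    ∀ j : Nat, j < comp.length →
      ((markLoop n p hp comp).getD j false = true ↔
        ∃ q k : Int, 2 ≤ q ∧ q * q ≤ n ∧ NoSmallDiv q ∧ q ≤ k ∧
          k ≤ PySem.Int.floordiv n q ∧ (j : Int) = q * k) := by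
  fun_induction markLoop with
  | case1 p hp comp h ih =>
    intro hn hinv j hj
    have hpn : p ≤ n := by nlinarith
    have hguard := hinv p.toNat (by omega)
    rw [show ((p.toNat : Int)) = p by omega] at hguard
    rw [PySem.List.pyGetD_of_nonneg _ _ (by omega : (0:Int) ≤ p)] at ih ⊢
    by_cases hg : comp.getD p.toNat false = false
    · -- p is unmarked here, so p has no proper divisor and its multiples get marked
      have hnsd : NoSmallDiv p := by
        intro d hd2 hdp hddvd
        obtain ⟨q, hq2, hqp, hqq, hqdvd, hqnsd⟩ := min_div p (by omega) d hd2 hdp hddvd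
        obtain ⟨k, hk⟩ := hqdvd
        have hmk : Marked n p p := by
          refine ⟨q, k, hq2, hqp, by omega, hqnsd, by nlinarith, ?_, hk⟩
          rw [PySem.Int.le_floordiv_iff_mul_le (by omega)]
          nlinarith
        rw [hguard.mpr hmk] at hg
        exact Bool.noConfusion hg
      rw [hg] at ih ⊢
      simp only [Bool.not_false, reduceIte, reduceDIte] at ih ⊢
      refine ih ?_ ?_ j ?_
      · rw [foldl_set_length]; exact hn
      · intro j' hj'
        rw [foldl_set_length] at hj'
        rw [foldl_set_getD _ _ _ _ hj', hinv j' hj']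
        constructor
        · rintro (⟨q, k, hq2, hqp, hqq, hqnsd, hqk, hkn, hjqk⟩ | ⟨k, hk, hfk⟩)
          · exact ⟨q, k, hq2, by omega, hqq, hqnsd, hqk, hkn, hjqk⟩
          · rw [PySem.List.mem_pyRange_one] at hk
            refine ⟨p, k, by omega, by omega, h, hnsd, hk.1, by omega, ?_⟩
            have : 0 ≤ p * k := mul_nonneg (by omega) (by omega)
            omega
        · rintro ⟨q, k, hq2, hqp1, hqq, hqnsd, hqk, hkn, hjqk⟩
          by_cases hqp : q = p
          · subst hqp
            refine Or.inr ⟨k, ?_, ?_⟩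
            · rw [PySem.List.mem_pyRange_one]; omega
            · omega
          · exact Or.inl ⟨q, k, hq2, by omega, hqq, hqnsd, hqk, hkn, hjqk⟩
      · rw [foldl_set_length]; exact hj
    · -- p is already marked: it has a proper divisor, nothing new gets marked
      have hgt : comp.getD p.toNat false = true := by
        rcases Bool.eq_false_or_eq_true (comp.getD p.toNat false) with ht | hf
        · exact ht
        · exact absurd hf hg
      have hnnsd : ¬ NoSmallDiv p := by
        obtain ⟨q, k, hq2, hqp, hqq, hqnsd, hqk, hkn, hpqk⟩ := hguard.mp hgt
        intro hnsd
        exact hnsd q hq2 hqp ⟨k, hpqk⟩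
      rw [hgt] at ih ⊢
      simp only [Bool.not_true, Bool.false_eq_true, dite_false] at ih ⊢
      refine ih hn ?_ j hj
      intro j' hj'
      rw [hinv j' hj']
      constructor
      · rintro ⟨q, k, hq2, hqp, hqq, hqnsd, hqk, hkn, hjqk⟩
        exact ⟨q, k, hq2, by omega, hqq, hqnsd, hqk, hkn, hjqk⟩
      · rintro ⟨q, k, hq2, hqp1, hqq, hqnsd, hqk, hkn, hjqk⟩
        by_cases hqp : q = p
        · exact absurd (hqp ▸ hqnsd) hnnsd
        · exact ⟨q, k, hq2, by omega, hqq, hqnsd, hqk, hkn, hjqk⟩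
  | case2 p hp comp h =>
    intro hn hinv j hj
    rw [hinv j hj]
    constructor
    · rintro ⟨q, k, hq2, hqp, hqq, hqnsd, hqk, hkn, hjqk⟩
      exact ⟨q, k, hq2, hqq, hqnsd, hqk, hkn, hjqk⟩
    · rintro ⟨q, k, hq2, hqq, hqnsd, hqk, hkn, hjqk⟩
      exact ⟨q, k, hq2, by nlinarith, hqq, hqnsd, hqk, hkn, hjqk⟩

lemma comp_getD_iff (n : Int) (hn : 4 ≤ n) (j : Nat) (hj : (j : Int) ≤ n) :
    ((markLoop n 2 (by norm_num) (List.replicate (n + 1).toNat false)).getD j false = false ↔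
      PrimeSpec (j : Int)) := by
  have h := markLoop_getD n 2 (by norm_num) (List.replicate (n + 1).toNat false)
    (by simp only [List.length_replicate]; omega)
    (by
      intro j' hj'
      simp only [List.getD, List.getElem?_replicate, List.length_replicate] at hj' ⊢
      rw [if_pos hj']
      simp only [Option.getD_some, Bool.false_eq_true, false_iff]
      rintro ⟨q, k, hq2, hqp, _⟩
      omega)
    j (by simp only [List.length_replicate]; omega)
  rw [← Bool.not_eq_true]
  simp only [List.getD] at h ⊢
  rw [h]
  constructor
  · rintro hne d hd hdd ⟨k, hk⟩
    have hdj : d < (j : Int) := by nlinarith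
    obtain ⟨q, hq2, hqj, hqq, hqdvd, hqnsd⟩ := min_div (j : Int) (by omega) d hd hdj ⟨k, hk⟩
    obtain ⟨k', hk'⟩ := hqdvd
    refine hne ⟨q, k', hq2, by omega, hqnsd, by nlinarith, ?_, hk'⟩
    rw [PySem.Int.le_floordiv_iff_mul_le (by omega)]
    nlinarith
  · rintro hps ⟨q, k, hq2, hqq, hqnsd, hqk, hkn, hjqk⟩
    exact hps q hq2 (by nlinarith) ⟨k, hjqk⟩

-- ===== VERDICT (by name: the statement is the Claim_ definition above) =====
theorem count_goldbach_pairs_spec : Claim_equal_count_goldbach_pairs := by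
  intro n _
  unfold Spec_count_goldbach_pairs count_goldbach_pairs count_goldbach_pairs_alt
  by_cases hg : n ≤ 2 ∨ PySem.Int.mod n 2 ≠ 0
  · rw [if_pos hg, if_pos hg]
  · rw [if_neg hg, if_neg hg]
    push Not at hg
    obtain ⟨hn2, heven⟩ := hg
    rw [PySem.Int.mod_eq_zero_iff_dvd] at heven
    have hn4 : 4 ≤ n := by omega
    have hdiv : PySem.Int.floordiv n 2 = n / 2 := PySem.Int.floordiv_eq_ediv_of_pos (by norm_num)
    apply PySem.List.foldl_congr_mem
    intro acc i hi
    rw [PySem.List.mem_pyRange_one, hdiv] at hi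
    have hi2 : 2 ≤ i := hi.1
    have hni : 2 ≤ n - i := by omega
    have hcond : (is_prime i && is_prime (n - i)) =
        (!(PySem.List.pyGetD (markLoop n 2 (by norm_num) (List.replicate (n + 1).toNat false)) i false) &&
         !(PySem.List.pyGetD (markLoop n 2 (by norm_num) (List.replicate (n + 1).toNat false)) (n - i) false)) := by
      have key : ∀ m : Int, 2 ≤ m → m ≤ n →
          is_prime m =
            !(PySem.List.pyGetD (markLoop n 2 (by norm_num) (List.replicate (n + 1).toNat false)) m false) := by
        intro m hm2 hmn
        have hB := comp_getD_iff n hn4 m.toNat (by omega)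
        rw [PySem.List.pyGetD_of_nonneg _ _ (by omega : (0:Int) ≤ m)]
        have hcast : ((m.toNat : Int)) = m := by omega
        rw [hcast] at hB
        by_cases hp : PrimeSpec m
        · rw [(is_prime_iff m).mpr ⟨hm2, hp⟩, hB.mpr hp]
          rfl
        · have hA : is_prime m = false := by
            rw [← Bool.not_eq_true, is_prime_iff]
            rintro ⟨_, hps⟩; exact hp hps
          have hBt : (markLoop n 2 (by norm_num) (List.replicate (n + 1).toNat false)).getD m.toNat false = true := by
            rcases Bool.eq_false_or_eq_true ((markLoop n 2 (by norm_num) (List.replicate (n + 1).toNat false)).getD m.toNat false) with ht | hf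
            · exact ht
            · exact absurd (hB.mp hf) hp
          rw [hA, hBt]
          rfl
      rw [key i hi2 (by omega), key (n - i) hni (by omega)]
    rw [hcond]
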